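-- pv_equiv track=rewrite | github.com/jpalat/AdventOfCode-2020 | day11/day11.py | check_right2
-- ===== SOURCE A (Python) =====
-- def check_right2(row, col, floor):
--     edge = len(floor[row])
--     if col == edge:
--         return 0
--     for c in range(col+1, edge):
--         if floor[row][c] == '#':
--             return 1
--         if floor[row][c] == 'L':
--             return 0
--     return 0
-- ===== SOURCE B (Python) =====
-- def check_right2(row, col, floor):
--     seg = floor[row][col+1:]
--     h = seg.index('#') if '#' in seg else -1
--     l = seg.index('L') if 'L' in seg else -1
--     return 1 if h != -1 and (l == -1 or h < l) else 0
-- ===== Notes on version B (the rewrite author's own statement) =====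
-- stated objective: idiomatic
-- what changed: Replaces the explicit index loop with early returns by a slice of the row and two independent first-occurrence searches ('#' vs 'L') whose positions are compared.
-- outside the precondition, e.g. on check_right2(0, -2, [['.', '#', '.']]): A returns 1, B returns 0
import Mathlib
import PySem

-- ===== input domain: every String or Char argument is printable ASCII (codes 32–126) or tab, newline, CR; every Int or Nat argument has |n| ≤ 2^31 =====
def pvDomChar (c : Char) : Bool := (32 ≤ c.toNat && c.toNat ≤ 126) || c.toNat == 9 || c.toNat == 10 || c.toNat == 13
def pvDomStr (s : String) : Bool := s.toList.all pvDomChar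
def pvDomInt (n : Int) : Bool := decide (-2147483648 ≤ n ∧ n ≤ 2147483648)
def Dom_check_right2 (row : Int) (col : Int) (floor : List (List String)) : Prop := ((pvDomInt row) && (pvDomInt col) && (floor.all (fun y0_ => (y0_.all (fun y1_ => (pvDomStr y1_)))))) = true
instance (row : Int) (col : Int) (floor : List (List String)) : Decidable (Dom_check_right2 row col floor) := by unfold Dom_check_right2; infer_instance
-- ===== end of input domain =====

-- B replaces A's early-return index loop by a slice plus two independent first-occurrence searches (idiomatic decomposition; same cost).


-- ===== PORT A =====
-- the 'for c in range(col+1, edge)' loop with its two early returns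
def pvGoA (r : List String) : List Int → Int
  | [] => 0
  | c :: cs =>
    match PySem.List.pyGet? r c with
    | none => 0   -- IndexError; unreachable under Pre_
    | some s => if s = "#" then 1 else if s = "L" then 0 else pvGoA r cs

def check_right2 (row : Int) (col : Int) (floor : List (List String)) : Int :=
  match PySem.List.pyGet? floor row with
  | none => 0   -- IndexError; unreachable under Pre_
  | some r =>
    let edge : Int := r.length
    if col = edge then 0
    else pvGoA r (PySem.List.pyRange (col + 1) edge 1)

-- ===== PORT B =====
-- "seg.index(v) if v in seg else -1"
def pvFind (seg : List String) (v : String) : Int :=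
  match PySem.List.index? seg v with
  | some i => (i : Int)
  | none => -1

def check_right2_alt (row : Int) (col : Int) (floor : List (List String)) : Int :=
  match PySem.List.pyGet? floor row with
  | none => 0   -- IndexError; unreachable under Pre_
  | some r =>
    let seg := PySem.List.slice r (some (col + 1)) none
    let h : Int := pvFind seg "#"
    let l : Int := pvFind seg "L"
    if h ≠ -1 ∧ (l = -1 ∨ h < l) then 1 else 0

-- ===== PRECONDITION & SPEC =====
-- Pre_ excludes a row index out of range (A raises IndexError) and col < -1, where A's
-- range start col+1 is a negative index and Python's wraparound makes the loop revisit trailing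
-- cells (or raise IndexError when col+1 < -len(row)) — an artefact of A's indexing; B slices.
def Pre_check_right2 (row : Int) (col : Int) (floor : List (List String)) : Prop :=
  PySem.Raise.InRange floor.length row ∧ -1 ≤ col
instance (row : Int) (col : Int) (floor : List (List String)) : Decidable (Pre_check_right2 row col floor) := by unfold Pre_check_right2; infer_instance

def pvWitness_check_right2 : Int × Int × List (List String) := (0, 0, [[".", "#"]])

def Spec_check_right2 (row : Int) (col : Int) (floor : List (List String)) (out : Int) : Prop := out = check_right2_alt row col floor
instance (row : Int) (col : Int) (floor : List (List String)) (out : Int) : Decidable (Spec_check_right2 row col floor out) := by unfold Spec_check_right2; infer_instance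

-- ===== CLAIM (what is proved, stated in full; the proofs are below) =====
def Claim_equal_check_right2 : Prop := ∀ (row : Int) (col : Int) (floor : List (List String)), Dom_check_right2 row col floor → Pre_check_right2 row col floor → Spec_check_right2 row col floor (check_right2 row col floor)

-- ===== LEMMAS AND PROOFS =====

-- the common semantic core: first seat to the right decides (1 for '#', 0 for 'L' or none)
def pvScan : List String → Int
  | [] => 0
  | s :: ss => if s = "#" then 1 else if s = "L" then 0 else pvScan ss

theorem pvScan_cons (s : String) (ss : List String) :
    pvScan (s :: ss) = if s = "#" then 1 else if s = "L" then 0 else pvScan ss := rfl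

-- pvFind facts
theorem pvFind_cons_self (v : String) (ss : List String) : pvFind (v :: ss) v = 0 := by
  unfold pvFind; rw [PySem.List.index?_cons_self]; rfl

theorem pvFind_cons_ne {s v : String} (ss : List String) (h : s ≠ v) :
    pvFind (s :: ss) v = if pvFind ss v = -1 then -1 else pvFind ss v + 1 := by
  unfold pvFind
  rw [PySem.List.index?_cons_of_ne ss h]
  rcases PySem.List.index? ss v with _ | i
  · simp
  · simp only [Option.map_some]
    rw [if_neg (by omega)]
    push_cast; ring

theorem pvFind_ge (ss : List String) (v : String) : -1 ≤ pvFind ss v := by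
  unfold pvFind
  rcases PySem.List.index? ss v with _ | i
  · show (-1 : Int) ≤ -1; omega
  · show (-1 : Int) ≤ (i : Int); omega

-- B's two-search formula on any segment equals the single scan
theorem pvB_eq_scan (seg : List String) :
    (if pvFind seg "#" ≠ -1 ∧ (pvFind seg "L" = -1 ∨ pvFind seg "#" < pvFind seg "L") then (1 : Int) else 0)
      = pvScan seg := by
  induction seg with
  | nil => decide
  | cons s ss ih =>
    have ha := pvFind_ge ss "#"
    have hb := pvFind_ge ss "L"
    by_cases hH : s = "#"
    · subst hH
      have hv : pvScan ("#" :: ss) = 1 := by rw [pvScan_cons, if_pos rfl]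
      rw [hv, pvFind_cons_self, pvFind_cons_ne ss (by decide : ("#" : String) ≠ "L")]
      by_cases c2 : pvFind ss "L" = -1
      · rw [if_pos c2, if_pos (by decide)]
      · rw [if_neg c2, if_pos ⟨by omega, Or.inr (by omega)⟩]
    · by_cases hL : s = "L"
      · subst hL
        have hv : pvScan ("L" :: ss) = 0 := by
          rw [pvScan_cons, if_neg (by decide), if_pos rfl]
        rw [hv, pvFind_cons_self, pvFind_cons_ne ss (by decide : ("L" : String) ≠ "#")]
        by_cases c1 : pvFind ss "#" = -1
        · rw [if_pos c1, if_neg (by decide)]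
        · rw [if_neg c1, if_neg (by omega)]
      · have hv : pvScan (s :: ss) = pvScan ss := by rw [pvScan_cons, if_neg hH, if_neg hL]
        rw [hv, ← ih, pvFind_cons_ne ss hH, pvFind_cons_ne ss hL]
        refine if_congr ?_ rfl rfl
        by_cases c1 : pvFind ss "#" = -1
        · rw [if_pos c1]
          by_cases c2 : pvFind ss "L" = -1
          · rw [if_pos c2]; omega
          · rw [if_neg c2]; omega
        · rw [if_neg c1]
          by_cases c2 : pvFind ss "L" = -1
          · rw [if_pos c2]; omega
          · rw [if_neg c2]; omega

-- A's loop over range(a, len r) equals the scan of the dropped suffix, for 0 ≤ a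
theorem pvA_eq_scan (r : List String) (a : Int) (ha : 0 ≤ a) :
    pvGoA r (PySem.List.pyRange a r.length 1) = pvScan (r.drop a.toNat) := by
  by_cases hlt : a < r.length
  · have hget : PySem.List.pyGet? r a = some (r[a.toNat]'(by omega)) :=
      PySem.List.pyGet?_eq_some_getElem r ha (by exact_mod_cast hlt)
    rw [PySem.List.pyRange_one_cons hlt]
    have hdrop : r.drop a.toNat = r[a.toNat]'(by omega) :: r.drop (a.toNat + 1) := by
      rw [List.drop_eq_getElem_cons (by omega)]
    rw [hdrop]
    simp only [pvGoA, hget, pvScan]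
    split_ifs with h1 h2
    · rfl
    · rfl
    · have : (a + 1).toNat = a.toNat + 1 := by omega
      rw [← this, pvA_eq_scan r (a + 1) (by omega)]
  · have hempty : PySem.List.pyRange a (r.length : Int) 1 = [] := by
      rw [PySem.List.pyRange_one]
      have : ((r.length : Int) - a).toNat = 0 := by omega
      simp [this]
    have hdrop : r.drop a.toNat = [] := by
      apply List.drop_eq_nil_of_le; omega
    rw [hempty, hdrop]; rfl
termination_by (r.length - a.toNat)
decreasing_by omega

-- ===== VERDICT (by name: the statement is the Claim_ definition above) =====
theorem check_right2_spec : Claim_equal_check_right2 := by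
  intro row col floor _ hpre
  obtain ⟨hrow, hcol⟩ := hpre
  unfold Spec_check_right2 check_right2 check_right2_alt
  obtain ⟨r, hr⟩ : ∃ r, PySem.List.pyGet? floor row = some r := by
    rcases h : PySem.List.pyGet? floor row with _ | r
    · exact absurd ((PySem.List.pyGet?_eq_none_iff floor row).mp h) (not_not_intro hrow)
    · exact ⟨r, rfl⟩
  rw [hr]
  simp only
  rw [PySem.List.slice_from r (show (0 : Int) ≤ col + 1 by omega), pvB_eq_scan]
  by_cases hedge : col = (r.length : Int)
  · rw [if_pos hedge]
    have : r.drop (col + 1).toNat = [] := by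
      apply List.drop_eq_nil_of_le; omega
    rw [this]; rfl
  · rw [if_neg hedge, pvA_eq_scan r (col + 1) (by omega)]
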